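-- pv_equiv track=rewrite | github.com/Foolllll-J/astrbot_plugin_reminder | core/utils.py | split_message_structure
-- ===== SOURCE A (Python) =====
-- from typing import Any, Dict, List, Optional
--
-- def split_message_structure(message_structure: List[Dict[str, Any]]) -> List[List[Dict[str, Any]]]:
--     """按平台限制拆分消息：video 和 record 必须单独发送。"""
--     chunks: List[List[Dict[str, Any]]] = []
--     current_chunk: List[Dict[str, Any]] = []
--
--     for msg_item in message_structure or []:
--         item_type = msg_item.get("type")
--         if item_type in ("record", "video"):
--             if current_chunk:
--                 chunks.append(current_chunk)
--                 current_chunk = []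
--             chunks.append([msg_item])
--             continue
--         current_chunk.append(msg_item)
--
--     if current_chunk:
--         chunks.append(current_chunk)
--
--     return chunks
-- ===== SOURCE B (Python) =====
-- from typing import Any, Dict, List, Optional
--
-- def split_message_structure(message_structure: List[Dict[str, Any]]) -> List[List[Dict[str, Any]]]:
--     """Slice off segments ending at the next record/video boundary until none remain."""
--     items = list(message_structure or [])
--     chunks: List[List[Dict[str, Any]]] = []
--     while items:
--         j = next((k for k, it in enumerate(items)
--                   if it.get("type") in ("record", "video")), None)
--         if j is None:
--             chunks.append(items)
--             break
--         if j > 0: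
--             chunks.append(items[:j])
--         chunks.append([items[j]])
--         items = items[j + 1:]
--     return chunks
-- ===== Notes on version B (the rewrite author's own statement) =====
-- stated objective: alternative
-- what changed: A accumulates a running current_chunk and flushes it at each record/video item; B instead repeatedly finds the index of the next record/video boundary and slices the list into prefix segment, singleton boundary chunk, and remainder, with no running accumulator.
import Mathlib
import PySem

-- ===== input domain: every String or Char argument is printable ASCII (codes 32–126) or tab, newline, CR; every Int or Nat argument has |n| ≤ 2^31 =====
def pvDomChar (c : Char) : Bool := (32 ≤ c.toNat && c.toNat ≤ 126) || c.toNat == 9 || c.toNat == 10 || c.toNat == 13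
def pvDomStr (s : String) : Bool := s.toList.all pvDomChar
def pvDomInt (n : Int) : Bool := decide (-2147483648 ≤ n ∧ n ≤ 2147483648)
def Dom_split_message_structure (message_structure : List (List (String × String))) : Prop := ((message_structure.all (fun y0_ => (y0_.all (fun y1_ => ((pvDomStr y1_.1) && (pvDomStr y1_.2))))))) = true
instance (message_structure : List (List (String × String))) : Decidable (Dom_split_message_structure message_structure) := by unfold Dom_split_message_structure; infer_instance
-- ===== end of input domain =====

-- B replaces A's running-chunk accumulator with repeated find-next-boundary + slicing (alternative decomposition, same cost).

-- ===== PORT A =====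
-- msg_item.get("type") in ("record", "video")
def pvIsBoundary (it : List (String × String)) : Bool :=
  match (PySem.Dict.mk it).get? "type" with
  | some t => t == "record" || t == "video"
  | none => false

def pvStepA (s : List (List (List (String × String))) × List (List (String × String)))
    (it : List (String × String)) :
    List (List (List (String × String))) × List (List (String × String)) :=
  if pvIsBoundary it then
    ((if s.2 ≠ [] then s.1 ++ [s.2] else s.1) ++ [[it]], [])
  else
    (s.1, s.2 ++ [it])

def split_message_structure (message_structure : List (List (String × String))) : List (List (List (String × String))) :=
  let s := message_structure.foldl pvStepA ([], [])
  if s.2 ≠ [] then s.1 ++ [s.2] else s.1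

-- ===== PORT B =====
-- while items: find first boundary index; slice off the prefix, the boundary, recurse on the rest
def pvBLoop (items : List (List (String × String))) (chunks : List (List (List (String × String)))) :
    List (List (List (String × String))) :=
  if _h : items = [] then chunks
  else
    match hj : items.findIdx? pvIsBoundary with
    | none => chunks ++ [items]
    | some j =>
        pvBLoop (items.drop (j + 1))
          ((chunks ++ (if j > 0 then [items.take j] else [])) ++ [[items.getD j []]])
termination_by items.length
decreasing_by
  simp only [List.length_drop]
  have := List.findIdx?_eq_some_iff_findIdx_eq.mp hj
  omega

def split_message_structure_alt (message_structure : List (List (String × String))) : List (List (List (String × String))) :=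
  pvBLoop message_structure []

-- ===== PRECONDITION & SPEC =====
def Spec_split_message_structure (message_structure : List (List (String × String))) (out : List (List (List (String × String)))) : Prop := out = split_message_structure_alt message_structure
instance (message_structure : List (List (String × String))) (out : List (List (List (String × String)))) : Decidable (Spec_split_message_structure message_structure out) := by unfold Spec_split_message_structure; infer_instance

-- ===== CLAIM (what is proved, stated in full; the proofs are below) =====
def Claim_equal_split_message_structure : Prop := ∀ (message_structure : List (List (String × String))), Dom_split_message_structure message_structure → Spec_split_message_structure message_structure (split_message_structure message_structure)

-- ===== LEMMAS AND PROOFS =====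

-- canonical recursive form carried by the proofs (not used by either port)
def pvC (current : List (List (String × String))) : List (List (String × String)) →
    List (List (List (String × String)))
  | [] => if current = [] then [] else [current]
  | x :: xs =>
      if pvIsBoundary x then
        (if current = [] then [] else [current]) ++ [[x]] ++ pvC [] xs
      else
        pvC (current ++ [x]) xs

def pvFinish (s : List (List (List (String × String))) × List (List (String × String))) :
    List (List (List (String × String))) :=
  if s.2 ≠ [] then s.1 ++ [s.2] else s.1

theorem pvFoldA_shift (xs : List (List (String × String)))
    (chunks : List (List (List (String × String)))) (current : List (List (String × String))) :
    pvFinish (xs.foldl pvStepA (chunks, current)) =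
      chunks ++ pvFinish (xs.foldl pvStepA ([], current)) := by
  induction xs generalizing chunks current with
  | nil =>
      simp only [List.foldl_nil, pvFinish]
      split_ifs <;> simp
  | cons x xs ih =>
      simp only [List.foldl_cons, pvStepA]
      by_cases hb : pvIsBoundary x
      · simp only [hb, if_pos]
        rw [ih, ih ((if current ≠ [] then [] ++ [current] else []) ++ [[x]]) []]
        split_ifs <;> simp
      · simp only [hb, if_neg, Bool.false_eq_true, not_false_iff]
        rw [ih, ih []]

theorem pvFoldA_eq_C (xs : List (List (String × String))) (current : List (List (String × String))) :
    pvFinish (xs.foldl pvStepA ([], current)) = pvC current xs := by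
  induction xs generalizing current with
  | nil =>
      simp only [List.foldl_nil, pvFinish, pvC]
      split_ifs <;> simp_all
  | cons x xs ih =>
      simp only [List.foldl_cons, pvStepA, pvC]
      by_cases hb : pvIsBoundary x
      · simp only [hb, if_pos]
        rw [pvFoldA_shift, ih]
        split_ifs <;> simp_all
      · simp only [hb, if_neg, Bool.false_eq_true, not_false_iff]
        exact ih (current ++ [x])

theorem pvC_no_boundary (xs : List (List (String × String)))
    (h : ∀ x ∈ xs, ¬ pvIsBoundary x) (current : List (List (String × String))) :
    pvC current xs = if current ++ xs = [] then [] else [current ++ xs] := by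
  induction xs generalizing current with
  | nil => simp [pvC]
  | cons x xs ih =>
      have hx : ¬ pvIsBoundary x := h x (by simp)
      simp only [pvC, hx, if_neg, Bool.false_eq_true, not_false_iff]
      rw [ih (fun y hy => h y (by simp [hy])) (current ++ [x])]
      simp

theorem pvC_boundary (xs : List (List (String × String))) (j : Nat)
    (hj : xs.findIdx? pvIsBoundary = some j) (current : List (List (String × String))) :
    pvC current xs =
      (if current ++ xs.take j = [] then [] else [current ++ xs.take j]) ++
        [[xs.getD j []]] ++ pvC [] (xs.drop (j + 1)) := by
  induction xs generalizing current j with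
  | nil => simp at hj
  | cons x xs ih =>
      rw [List.findIdx?_cons] at hj
      by_cases hb : pvIsBoundary x
      · simp only [hb, if_pos] at hj
        have hj0 : j = 0 := by simpa using hj.symm
        subst hj0
        simp [pvC, hb]
      · simp only [hb, Bool.false_eq_true, if_neg, not_false_iff] at hj
        rcases Option.map_eq_some_iff.mp hj with ⟨k, hk, rfl⟩
        simp only [pvC, hb, Bool.false_eq_true, if_neg, not_false_iff]
        rw [ih k hk (current ++ [x])]
        simp [List.getD]

theorem pvBLoop_eq_C (n : Nat) (items : List (List (String × String)))
    (hn : items.length ≤ n) (chunks : List (List (List (String × String)))) :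
    pvBLoop items chunks = chunks ++ pvC [] items := by
  induction n generalizing items chunks with
  | zero =>
      have : items = [] := List.eq_nil_of_length_eq_zero (by omega)
      subst this
      simp [pvBLoop, pvC]
  | succ n ih =>
      by_cases h : items = []
      · subst h; simp [pvBLoop, pvC]
      · rw [pvBLoop]
        simp only [h, dif_neg, not_false_iff]
        split
        next hj =>
            have hnb : ∀ x ∈ items, ¬ pvIsBoundary x := by
              intro x hx
              have := List.findIdx?_eq_none_iff.mp hj
              simpa using this x hx
            rw [pvC_no_boundary items hnb []]
            simp [h]
        next j hj =>
            have hjlt : j < items.length := by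
              have := List.findIdx?_eq_some_iff_findIdx_eq.mp hj
              omega
            rw [ih (items.drop (j + 1)) (by simp only [List.length_drop]; omega)]
            rw [pvC_boundary items j hj []]
            have htake : items.take j = [] ↔ j = 0 := by
              constructor
              · intro he
                have : min j items.length = 0 := by simpa using congrArg List.length he
                have : items.length ≠ 0 := fun hc => h (List.eq_nil_of_length_eq_zero hc)
                omega
              · intro hc; simp [hc]
            by_cases hp : j = 0
            · simp [hp]
            · simp [htake, hp, Nat.pos_of_ne_zero hp]

theorem split_message_structure_spec : Claim_equal_split_message_structure := by
  intro ms _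
  unfold Spec_split_message_structure split_message_structure split_message_structure_alt
  rw [pvBLoop_eq_C ms.length ms le_rfl []]
  simpa [pvFinish] using pvFoldA_eq_C ms []
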